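-- pv_equiv track=rewrite | github.com/eneskemalergin/Bioinformatics-Ore | rosalind_solutions/025-LONG.py | match_seq
-- ===== SOURCE A (Python) =====
-- def match_seq(seq, seq_list):
--     half = int(len(seq)/2)
--     for i in range(len(seq)-1, half, -1):
--         overlap = seq[len(seq)-i:]
--         for seq2 in seq_list:
--             if seq2 != seq:
--                 if seq2[:i] == overlap:
--                     return seq[:len(seq)-i] + seq2
-- ===== SOURCE B (Python) =====
-- def match_seq(seq, seq_list):
--     n = len(seq)
--     half = n // 2
--     best_k = 0
--     best_s = None
--     for s in seq_list:
--         if s == seq: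
--             continue
--         k = next((i for i in range(min(n - 1, len(s)), half, -1)
--                   if s[:i] == seq[n - i:]), 0)
--         if k > best_k:
--             best_k, best_s = k, s
--     if best_s is None:
--         return None
--     return seq[:n - best_k] + best_s
-- ===== Notes on version B (the rewrite author's own statement) =====
-- stated objective: faster
-- what changed: A scans overlap lengths from longest down, rescanning the whole list at every length; B makes one pass over the list, computing each candidate's own maximal overlap with the search capped at the candidate's length (candidates shorter than half the read are skipped outright) and keeping the first maximizer in a running-best accumulator.
import Mathlib
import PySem

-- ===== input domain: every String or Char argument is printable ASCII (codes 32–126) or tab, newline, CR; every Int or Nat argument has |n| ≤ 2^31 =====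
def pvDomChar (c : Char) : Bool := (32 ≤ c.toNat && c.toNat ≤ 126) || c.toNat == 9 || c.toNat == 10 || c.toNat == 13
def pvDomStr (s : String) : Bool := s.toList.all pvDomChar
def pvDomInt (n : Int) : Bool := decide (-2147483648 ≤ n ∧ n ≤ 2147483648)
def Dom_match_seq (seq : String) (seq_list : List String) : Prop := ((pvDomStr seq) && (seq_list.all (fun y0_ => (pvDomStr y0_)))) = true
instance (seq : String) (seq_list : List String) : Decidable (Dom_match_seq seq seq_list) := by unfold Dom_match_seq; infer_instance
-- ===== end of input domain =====

-- B replaces A's longest-first global rescan by a single pass over the list keeping a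
-- running best: each candidate's maximal overlap is searched only up to its own length
-- (objective: faster, measured; same results).

-- ===== PORT A =====
-- inner 'for seq2 in seq_list' loop (ov = the current overlap string)
def matchSeqInner (seq ov : String) (i : Int) : List String → Option String
  | [] => none
  | s :: rest =>
    if s ≠ seq then
      if PySem.Str.slice s none (some i) = ov then
        some (PySem.Str.slice seq none (some (PySem.Str.len seq - i)) ++ s)
      else matchSeqInner seq ov i rest
    else matchSeqInner seq ov i rest

-- outer 'for i in range(len(seq)-1, half, -1)' loop with early return
def matchSeqOuter (seq : String) (seq_list : List String) : List Int → Option String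
  | [] => none
  | i :: rest =>
    match matchSeqInner seq (PySem.Str.slice seq (some (PySem.Str.len seq - i)) none) i seq_list with
    | some r => some r
    | none => matchSeqOuter seq seq_list rest

def match_seq (seq : String) (seq_list : List String) : Option String :=
  matchSeqOuter seq seq_list
    (PySem.List.pyRange (PySem.Str.len seq - 1) (PySem.Int.truncdiv (PySem.Str.len seq) 2) (-1))

-- ===== PORT B =====
-- k = next((i for i in range(min(n-1, len(s)), half, -1) if s[:i] == seq[n-i:]), 0)
def altBestK (seq s : String) : List Int → Int
  | [] => 0
  | i :: rest =>
    if PySem.Str.slice s none (some i) = PySem.Str.slice seq (some (PySem.Str.len seq - i)) none then i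
    else altBestK seq s rest

-- loop body of B's single pass (running best accumulator)
def altStep (seq : String) (st : Int × Option String) (s : String) : Int × Option String :=
  if s = seq then st
  else
    let k := altBestK seq s
      (PySem.List.pyRange (min (PySem.Str.len seq - 1) (PySem.Str.len s))
        (PySem.Int.floordiv (PySem.Str.len seq) 2) (-1))
    if st.1 < k then (k, some s) else st

def match_seq_alt (seq : String) (seq_list : List String) : Option String :=
  match seq_list.foldl (altStep seq) (0, none) with
  | (_, none) => none
  | (k, some s) => some (PySem.Str.slice seq none (some (PySem.Str.len seq - k)) ++ s)

-- ===== PRECONDITION & SPEC =====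
def Spec_match_seq (seq : String) (seq_list : List String) (out : Option String) : Prop := out = match_seq_alt seq seq_list
instance (seq : String) (seq_list : List String) (out : Option String) : Decidable (Spec_match_seq seq seq_list out) := by unfold Spec_match_seq; infer_instance

-- ===== CLAIM (what is proved, stated in full; the proofs are below) =====
def Claim_equal_match_seq : Prop := ∀ (seq : String) (seq_list : List String), Dom_match_seq seq seq_list → Spec_match_seq seq seq_list (match_seq seq seq_list)

-- ===== LEMMAS AND PROOFS =====

-- the overlap test at length i, and A's full inner test (seq2 != seq as well)
def pvQ (seq s : String) (i : Int) : Bool :=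
  decide (PySem.Str.slice s none (some i) = PySem.Str.slice seq (some (PySem.Str.len seq - i)) none)
def pvP (seq s : String) (i : Int) : Bool := decide (¬ s = seq) && pvQ seq s i

-- the full admissible range of A's outer loop
def pvR (seq : String) : List Int :=
  PySem.List.pyRange (PySem.Str.len seq - 1) (PySem.Int.floordiv (PySem.Str.len seq) 2) (-1)

-- a candidate's maximal admissible overlap length (0 if none)
def pvVal (seq s : String) : Int :=
  if s = seq then 0 else ((pvR seq).find? (pvQ seq s)).getD 0

-- generic list lemmas --------------------------------------------------------

theorem pvFindSome?_eq_bind {α β : Type} (f : α → Option β) (l : List α) :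
    l.findSome? f = (l.find? (fun a => (f a).isSome)).bind f := by
  induction l with
  | nil => rfl
  | cons a t ih =>
    simp only [List.findSome?_cons, List.find?_cons]
    cases h : f a <;> simp [h, ih]

theorem pvFind?_desc_max {R : List Int} (hR : R.Pairwise (· > ·)) {p : Int → Bool} {j : Int}
    (h : R.find? p = some j) : ∀ k ∈ R, p k = true → k ≤ j := by
  induction R with
  | nil => simp at h
  | cons a t ih =>
    rw [List.pairwise_cons] at hR
    rw [List.find?_cons] at h
    intro k hk hpk
    by_cases hpa : p a = true
    · simp [hpa] at h
      rcases List.mem_cons.mp hk with rfl | hk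
      · omega
      · have := hR.1 k hk; omega
    · simp [Bool.not_eq_true] at hpa
      rw [hpa] at h; simp at h
      rcases List.mem_cons.mp hk with rfl | hk
      · simp [hpa] at hpk
      · exact ih hR.2 h k hk hpk

theorem pvFind?_desc_eq_some {R : List Int} (hR : R.Pairwise (· > ·)) {p : Int → Bool} {j : Int}
    (hmem : j ∈ R) (hp : p j = true) (hmax : ∀ k ∈ R, p k = true → k ≤ j) :
    R.find? p = some j := by
  induction R with
  | nil => simp at hmem
  | cons a t ih =>
    rw [List.pairwise_cons] at hR
    rw [List.find?_cons]
    by_cases hpa : p a = true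
    · have haj : a ≤ j := hmax a (by simp) hpa
      have : j = a := by
        rcases List.mem_cons.mp hmem with rfl | hj
        · rfl
        · have := hR.1 j hj; omega
      simp [hpa, this]
    · simp [Bool.not_eq_true] at hpa
      rw [hpa]; simp
      have hj : j ∈ t := by
        rcases List.mem_cons.mp hmem with rfl | hj
        · simp [hpa] at hp
        · exact hj
      exact ih hR.2 hj (fun k hk hpk => hmax k (by simp [hk]) hpk)

theorem pvFind?_congr_mem {α : Type} {l : List α} {p q : α → Bool}
    (h : ∀ x ∈ l, p x = q x) : l.find? p = l.find? q := by
  induction l with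
  | nil => rfl
  | cons a t ih =>
    rw [List.find?_cons, List.find?_cons, h a (by simp)]
    cases q a <;> simp [ih (fun x hx => h x (by simp [hx]))]

theorem pvFoldl_max_attain (val : String → Int) (l : List String) :
    ∀ b : Int, l.foldl (fun a s => max a (val s)) b = b ∨
      ∃ s ∈ l, val s = l.foldl (fun a s => max a (val s)) b := by
  induction l with
  | nil => intro b; left; rfl
  | cons a t ih =>
    intro b
    simp only [List.foldl_cons]
    rcases max_choice b (val a) with h | h
    · rw [h]
      rcases ih b with h2 | ⟨s, hs, h2⟩
      · left; exact h2
      · right; exact ⟨s, by simp [hs], h2⟩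
    · rw [h]
      rcases ih (val a) with h2 | ⟨s, hs, h2⟩
      · right; exact ⟨a, by simp, h2.symm ▸ rfl⟩
      · right; exact ⟨s, by simp [hs], h2⟩

theorem pvPairwise_gt_pyRange_neg_one (a b : Int) :
    (PySem.List.pyRange a b (-1)).Pairwise (· > ·) := by
  rw [PySem.List.pyRange_neg_one_eq_reverse]
  rw [List.pairwise_reverse]
  exact PySem.List.pairwise_lt_pyRange_one _ _

-- facts about pvR / pvQ ------------------------------------------------------

theorem pvHalf_nonneg (seq : String) : 0 ≤ PySem.Int.floordiv (PySem.Str.len seq) 2 := by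
  rw [PySem.Int.floordiv_eq_ediv_of_pos (by omega)]
  have : (0:Int) ≤ PySem.Str.len seq := by rw [PySem.Str.len_eq]; positivity
  omega

theorem pvMem_pvR {seq : String} {i : Int} (h : i ∈ pvR seq) :
    PySem.Int.floordiv (PySem.Str.len seq) 2 < i ∧ i ≤ PySem.Str.len seq - 1 := by
  rw [pvR, PySem.List.mem_pyRange_neg_one] at h
  exact h

-- the overlap test can only succeed for i ≤ len(s)
theorem pvQ_le_len {seq s : String} {i : Int} (hi : 0 < i) (hin : i ≤ PySem.Str.len seq - 1)
    (hq : pvQ seq s i = true) : i ≤ PySem.Str.len s := by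
  rw [pvQ, decide_eq_true_iff] at hq
  have h := congrArg String.toList hq
  rw [PySem.Str.toList_slice, PySem.Str.toList_slice,
      PySem.Chars.slice_eq_listSlice, PySem.Chars.slice_eq_listSlice] at h
  rw [PySem.Str.len_eq] at hin
  have hn : (0:Int) ≤ (seq.toList.length : Int) - i := by omega
  rw [PySem.List.slice_to _ (le_of_lt hi)] at h
  rw [PySem.Str.len_eq] at h
  rw [PySem.List.slice_from _ hn] at h
  have hl := congrArg List.length h
  rw [List.length_take, List.length_drop] at hl
  rw [PySem.Str.len_eq]
  omega

theorem pvAltBestK_find (seq s : String) (L : List Int) :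
    altBestK seq s L = (L.find? (pvQ seq s)).getD 0 := by
  induction L with
  | nil => rfl
  | cons i t ih =>
    rw [altBestK, List.find?_cons]
    by_cases h : PySem.Str.slice s none (some i)
        = PySem.Str.slice seq (some (PySem.Str.len seq - i)) none
    · have hq : pvQ seq s i = true := by rw [pvQ, decide_eq_true_iff]; exact h
      rw [if_pos h, hq]
      rfl
    · have hq : pvQ seq s i = false := by rw [pvQ, decide_eq_false_iff_not]; exact h
      rw [if_neg h, hq]
      exact ih

theorem pvVal_ge {seq s : String} {i : Int} (hs : s ≠ seq) (hi : i ∈ pvR seq)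
    (hq : pvQ seq s i = true) : i ≤ pvVal seq s := by
  rw [pvVal, if_neg hs]
  rcases h : (pvR seq).find? (pvQ seq s) with _ | j
  · rw [List.find?_eq_none] at h
    exact absurd hq (h i hi)
  · rw [Option.getD_some]
    exact pvFind?_desc_max (by rw [pvR]; exact pvPairwise_gt_pyRange_neg_one _ _) h i hi hq

theorem pvVal_pos_spec {seq s : String} (h : 0 < pvVal seq s) :
    s ≠ seq ∧ pvVal seq s ∈ pvR seq ∧ pvQ seq s (pvVal seq s) = true := by
  by_cases hs : s = seq
  · rw [pvVal, if_pos hs] at h; omega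
  · rw [pvVal, if_neg hs] at h ⊢
    rcases hf : (pvR seq).find? (pvQ seq s) with _ | j
    · rw [hf] at h; simp at h
    · rw [hf] at h
      simp only [Option.getD_some] at h ⊢
      exact ⟨hs, List.mem_of_find?_eq_some hf, List.find?_some hf⟩

-- for s ≠ seq, B's capped search equals the search over the full range
theorem pvAltBestK_eq (seq s : String) :
    altBestK seq s
      (PySem.List.pyRange (min (PySem.Str.len seq - 1) (PySem.Str.len s))
        (PySem.Int.floordiv (PySem.Str.len seq) 2) (-1))
    = ((pvR seq).find? (pvQ seq s)).getD 0 := by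
  have hcap : altBestK seq s
      (PySem.List.pyRange (min (PySem.Str.len seq - 1) (PySem.Str.len s))
        (PySem.Int.floordiv (PySem.Str.len seq) 2) (-1))
      = ((PySem.List.pyRange (min (PySem.Str.len seq - 1) (PySem.Str.len s))
        (PySem.Int.floordiv (PySem.Str.len seq) 2) (-1)).find? (pvQ seq s)).getD 0 :=
    pvAltBestK_find seq s _
  rw [hcap]
  suffices hfind : (PySem.List.pyRange (min (PySem.Str.len seq - 1) (PySem.Str.len s))
      (PySem.Int.floordiv (PySem.Str.len seq) 2) (-1)).find? (pvQ seq s)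
      = (pvR seq).find? (pvQ seq s) by rw [hfind]
  rcases hfull : (pvR seq).find? (pvQ seq s) with _ | j
  · rw [List.find?_eq_none] at hfull ⊢
    intro k hk
    apply hfull
    rw [PySem.List.mem_pyRange_neg_one] at hk
    rw [pvR, PySem.List.mem_pyRange_neg_one]
    omega
  · have hjmem : j ∈ pvR seq := List.mem_of_find?_eq_some hfull
    have hjq : pvQ seq s j = true := List.find?_some hfull
    have hjr := pvMem_pvR hjmem
    have hhalf := pvHalf_nonneg seq
    have hjle : j ≤ PySem.Str.len s := pvQ_le_len (by omega) hjr.2 hjq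
    have hmax := pvFind?_desc_max (by rw [pvR]; exact pvPairwise_gt_pyRange_neg_one _ _) hfull
    apply pvFind?_desc_eq_some (pvPairwise_gt_pyRange_neg_one _ _)
    · rw [PySem.List.mem_pyRange_neg_one]
      omega
    · exact hjq
    · intro k hk hpk
      apply hmax k _ hpk
      rw [PySem.List.mem_pyRange_neg_one] at hk
      rw [pvR, PySem.List.mem_pyRange_neg_one]
      omega

-- altStep in terms of pvVal
theorem pvAltStep_eq (seq s : String) (st : Int × Option String) (h0 : 0 ≤ st.1) :
    altStep seq st s = if st.1 < pvVal seq s then (pvVal seq s, some s) else st := by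
  by_cases hs : s = seq
  · rw [altStep, if_pos hs, pvVal, if_pos hs, if_neg (by omega)]
  · rw [altStep, if_neg hs, pvVal, if_neg hs]
    simp only [pvAltBestK_eq seq s]

-- B's fold characterised
theorem pvFoldB (seq : String) (l : List String) :
    ∀ (b : Int) (o : Option String), 0 ≤ b →
      l.foldl (altStep seq) (b, o) =
        (l.foldl (fun a s => max a (pvVal seq s)) b,
         if b < l.foldl (fun a s => max a (pvVal seq s)) b then
           l.find? (fun s => pvVal seq s == l.foldl (fun a s => max a (pvVal seq s)) b)
         else o) := by
  induction l with
  | nil => intro b o h0; simp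
  | cons s t ih =>
    intro b o h0
    simp only [List.foldl_cons]
    rw [pvAltStep_eq seq s (b, o) h0]
    by_cases hlt : b < pvVal seq s
    · rw [if_pos hlt]
      rw [ih (pvVal seq s) (some s) (by omega)]
      have hmax : max b (pvVal seq s) = pvVal seq s := max_eq_right (le_of_lt hlt)
      rw [hmax]
      have hvM := (PySem.List.le_foldl_max_int t (pvVal seq) (pvVal seq s)).1
      have hbM : b < t.foldl (fun a s => max a (pvVal seq s)) (pvVal seq s) := by omega
      rw [if_pos hbM, List.find?_cons]
      by_cases hve : pvVal seq s = t.foldl (fun a s => max a (pvVal seq s)) (pvVal seq s)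
      · have hb : (pvVal seq s == t.foldl (fun a s => max a (pvVal seq s)) (pvVal seq s)) = true :=
          beq_iff_eq.mpr hve
        rw [hb, if_neg (by omega)]
      · have hb : (pvVal seq s == t.foldl (fun a s => max a (pvVal seq s)) (pvVal seq s)) = false :=
          beq_eq_false_iff_ne.mpr hve
        rw [hb, if_pos (by omega)]
    · rw [if_neg hlt]
      rw [ih b o h0]
      have hmax : max b (pvVal seq s) = b := max_eq_left (by omega)
      rw [hmax]
      by_cases hbM : b < t.foldl (fun a s => max a (pvVal seq s)) b
      · rw [if_pos hbM, if_pos hbM, List.find?_cons]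
        have hb : (pvVal seq s == t.foldl (fun a s => max a (pvVal seq s)) b) = false :=
          beq_eq_false_iff_ne.mpr (by omega)
        rw [hb]
      · rw [if_neg hbM, if_neg hbM]

-- A's loops characterised
theorem pvInner_eq (seq : String) (i : Int) (l : List String) :
    matchSeqInner seq (PySem.Str.slice seq (some (PySem.Str.len seq - i)) none) i l
      = (l.find? (fun s => pvP seq s i)).map
          (fun s => PySem.Str.slice seq none (some (PySem.Str.len seq - i)) ++ s) := by
  induction l with
  | nil => rfl
  | cons s t ih =>
    rw [matchSeqInner, List.find?_cons]
    by_cases hs : s = seq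
    · have hp : pvP seq s i = false := by rw [pvP]; simp [hs]
      rw [if_neg (by simp [hs]), hp]
      exact ih
    · rw [if_pos hs]
      by_cases hq : PySem.Str.slice s none (some i)
          = PySem.Str.slice seq (some (PySem.Str.len seq - i)) none
      · have hqt : pvQ seq s i = true := by rw [pvQ, decide_eq_true_iff]; exact hq
        have hp : pvP seq s i = true := by
          rw [pvP, hqt, Bool.and_true, decide_eq_true_iff]; exact hs
        rw [if_pos hq, hp]
        rfl
      · have hqf : pvQ seq s i = false := by rw [pvQ, decide_eq_false_iff_not]; exact hq
        have hp : pvP seq s i = false := by rw [pvP, hqf, Bool.and_false]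
        rw [if_neg hq, hp]
        exact ih

theorem pvOuter_eq (seq : String) (l : List String) (Rl : List Int) :
    matchSeqOuter seq l Rl
      = Rl.findSome? (fun i => (l.find? (fun s => pvP seq s i)).map
          (fun s => PySem.Str.slice seq none (some (PySem.Str.len seq - i)) ++ s)) := by
  induction Rl with
  | nil => rfl
  | cons i r ih =>
    rw [matchSeqOuter, List.findSome?_cons, pvInner_eq]
    rcases h : l.find? (fun s => pvP seq s i) with _ | s
    · simp only [Option.map_none]
      exact ih
    · simp only [Option.map_some]

theorem pvTruncdiv_eq (seq : String) :
    PySem.Int.truncdiv (PySem.Str.len seq) 2 = PySem.Int.floordiv (PySem.Str.len seq) 2 := by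
  rw [PySem.Int.floordiv_eq_ediv_of_pos (by omega), PySem.Int.truncdiv, PySem.Str.len_eq]
  exact Int.tdiv_eq_ediv_of_nonneg (by positivity)

-- ===== VERDICT (by name: the statement is the Claim_ definition above) =====
theorem match_seq_spec : Claim_equal_match_seq := by
  intro seq l _hd
  show match_seq seq l = match_seq_alt seq l
  rw [match_seq, pvTruncdiv_eq, show
      PySem.List.pyRange (PySem.Str.len seq - 1) (PySem.Int.floordiv (PySem.Str.len seq) 2) (-1)
        = pvR seq from rfl]
  rw [pvOuter_eq, pvFindSome?_eq_bind]
  simp only [Option.isSome_map]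
  rw [match_seq_alt]
  rw [pvFoldB seq l 0 none (le_refl 0)]
  have hM0 := (PySem.List.le_foldl_max_int l (pvVal seq) 0).1
  have hMub := (PySem.List.le_foldl_max_int l (pvVal seq) 0).2
  set M := l.foldl (fun a s => max a (pvVal seq s)) 0 with hMdef
  by_cases hM : 0 < M
  · -- some candidate matches; M is the winning overlap length
    rcases pvFoldl_max_attain (pvVal seq) l 0 with hat | ⟨s0, hs0, hvs0⟩
    · omega
    · rw [← hMdef] at hvs0
      have hspec := pvVal_pos_spec (seq := seq) (s := s0) (by omega)
      rw [hvs0] at hspec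
      -- A's outer find? returns M
      have hAfind : (pvR seq).find?
          (fun i => (l.find? (fun s => pvP seq s i)).isSome) = some M := by
        apply pvFind?_desc_eq_some (by rw [pvR]; exact pvPairwise_gt_pyRange_neg_one _ _)
        · exact hspec.2.1
        · rw [List.find?_isSome]
          exact ⟨s0, hs0, by simp [pvP, hspec.1, hspec.2.2]⟩
        · intro k hk hpk
          rw [List.find?_isSome] at hpk
          rcases hpk with ⟨s, hsl, hps⟩
          rw [pvP, Bool.and_eq_true, decide_eq_true_iff] at hps
          have := pvVal_ge hps.1 hk hps.2
          have := hMub s hsl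
          omega
      rw [hAfind, if_pos hM]
      have hbind : ((some M).bind fun i =>
          Option.map (fun s => PySem.Str.slice seq none (some (PySem.Str.len seq - i)) ++ s)
            (List.find? (fun s => pvP seq s i) l))
          = Option.map (fun s => PySem.Str.slice seq none (some (PySem.Str.len seq - M)) ++ s)
            (List.find? (fun s => pvP seq s M) l) := rfl
      rw [hbind]
      -- the two find?s over l agree
      have hcongr : l.find? (fun s => pvVal seq s == M) = l.find? (fun s => pvP seq s M) := by
        apply pvFind?_congr_mem
        intro s hsl
        by_cases hp : pvP seq s M = true
        · rw [hp]
          rw [pvP, Bool.and_eq_true, decide_eq_true_iff] at hp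
          have h1 := pvVal_ge hp.1 hspec.2.1 hp.2
          have h2 := hMub s hsl
          simp only [beq_iff_eq]
          omega
        · rw [Bool.not_eq_true] at hp
          rw [hp, beq_eq_false_iff_ne, ne_eq]
          intro hveq
          have := pvVal_pos_spec (seq := seq) (s := s) (by omega)
          rw [hveq] at this
          rw [pvP] at hp
          simp [this.1, this.2.2] at hp
      rw [hcongr]
      rcases hfind : l.find? (fun s => pvP seq s M) with _ | sstar
      · -- impossible: s0 matches at M
        rw [List.find?_eq_none] at hfind
        exact absurd (by simp [pvP, hspec.1, hspec.2.2] : pvP seq s0 M = true)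
          (hfind s0 hs0)
      · rfl
  · -- no candidate matches at any admissible length: both sides are none
    have hMz : M = 0 := by omega
    have hAfind : (pvR seq).find?
        (fun i => (l.find? (fun s => pvP seq s i)).isSome) = none := by
      rw [List.find?_eq_none]
      intro i hi hsome
      rw [List.find?_isSome] at hsome
      rcases hsome with ⟨s, hsl, hps⟩
      rw [pvP, Bool.and_eq_true, decide_eq_true_iff] at hps
      have h1 := pvVal_ge hps.1 hi hps.2
      have h2 := hMub s hsl
      have h3 := pvMem_pvR hi
      have h4 := pvHalf_nonneg seq
      omega
    rw [hAfind, if_neg hM]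
    rfl
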